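-- pv_equiv track=rewrite | github.com/rachelmurali/rachelmuralitharan_projects | ClassesTiming.py | lecture_hall_helper
-- ===== SOURCE A (Python) =====
-- def lecture_hall_helper(classes, count, prevStart, prevEnd, num):
--     # helper function that recurses through the given combination of classes list and returns the count of classes that can fit in a scedule together
--
--     classStart = classes[num][0]                              # gets current class start time
--     classEnd = classes[num][1]                                # gets current class end time
--
--     # base case: if we have looped through all the classes, return count
--     if(num == len(classes) - 1):
--         return count
--
--     # if the class starts after the previous end time, change prevEnd, add to count, and recurse
--     if(classStart >= prevEnd):
--         count += 1
--         prevEnd = classEnd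
--         return lecture_hall_helper(classes, count, prevStart, prevEnd, num + 1)
--
--     # if the class ends before the previous start time, change prevStart, add to count, and recurse
--     if(classEnd <= prevStart):
--         count += 1
--         prevStart = classStart
--         return lecture_hall_helper(classes, count, prevStart, prevEnd, num + 1)
--
--     # if no conditions are true, recurse without changing any variables except num + 1
--     else:
--         return lecture_hall_helper(classes, count, prevStart, prevEnd, num + 1)
-- ===== SOURCE B (Python) =====
-- def lecture_hall_helper(classes, count, prevStart, prevEnd, num):
--     # Iterative version: one loop over the class list, keeping the running
--     # count and the current schedule boundaries in plain local variables.
--     last = len(classes) - 1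
--     while True:
--         classStart, classEnd = classes[num]
--         if num == last:
--             return count
--         if classStart >= prevEnd:
--             count += 1
--             prevEnd = classEnd
--         elif classEnd <= prevStart:
--             count += 1
--             prevStart = classStart
--         num += 1
-- ===== Notes on version B (the rewrite author's own statement) =====
-- stated objective: simpler
-- what changed: The tail recursion over an index is rewritten as a single while loop that mutates count, prevStart, prevEnd and num as locals, removing the recursion (and its RecursionError risk on long lists) entirely.
import Mathlib
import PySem

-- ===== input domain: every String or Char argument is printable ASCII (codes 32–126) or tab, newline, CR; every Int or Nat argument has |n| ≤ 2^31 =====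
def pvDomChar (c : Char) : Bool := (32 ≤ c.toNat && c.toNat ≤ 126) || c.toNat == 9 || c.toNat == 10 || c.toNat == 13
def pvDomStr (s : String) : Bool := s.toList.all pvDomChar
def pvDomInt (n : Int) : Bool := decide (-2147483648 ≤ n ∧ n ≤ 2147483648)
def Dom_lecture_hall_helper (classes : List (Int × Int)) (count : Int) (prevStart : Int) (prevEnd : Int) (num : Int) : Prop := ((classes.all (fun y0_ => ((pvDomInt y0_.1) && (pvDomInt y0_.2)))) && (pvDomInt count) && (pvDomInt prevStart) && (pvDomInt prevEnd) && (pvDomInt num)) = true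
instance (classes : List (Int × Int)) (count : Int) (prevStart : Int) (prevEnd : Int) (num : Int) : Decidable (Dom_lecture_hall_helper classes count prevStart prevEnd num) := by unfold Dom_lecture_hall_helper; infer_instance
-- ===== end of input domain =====

-- B rewrites A's tail recursion as a plain while loop over mutable locals
-- (objective: simpler; same values where A returns).

-- ===== PORT A =====
-- classes[num] raises IndexError when pyGet? is none; that case is excluded by Pre_
-- (the port returns 0 there, a value the claim never reaches). The extra Nat argument
-- of lhhA is fuel making the recursion structural; 2*len+1 steps always suffice.
def lhhA (classes : List (Int × Int)) (count : Int) (prevStart : Int) (prevEnd : Int) (num : Int) : Nat → Int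
  | 0 => 0
  | fuel + 1 =>
    match PySem.List.pyGet? classes num with
    | none => 0   -- IndexError (outside Pre_)
    | some cls =>
      let classStart := cls.1
      let classEnd := cls.2
      if num = (classes.length : Int) - 1 then count
      else if classStart ≥ prevEnd then
        lhhA classes (count + 1) prevStart classEnd (num + 1) fuel
      else if classEnd ≤ prevStart then
        lhhA classes (count + 1) classStart prevEnd (num + 1) fuel
      else
        lhhA classes count prevStart prevEnd (num + 1) fuel

def lecture_hall_helper (classes : List (Int × Int)) (count : Int) (prevStart : Int) (prevEnd : Int) (num : Int) : Int :=
  lhhA classes count prevStart prevEnd num (2 * classes.length + 1)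

-- ===== PORT B =====
-- the while-True loop; state = (count, prevStart, prevEnd, num), one iteration
-- = read classes[num], test the exit, update the state with the if/elif chain.
-- Same fuel device as above; within Pre_ the loop exits before the fuel runs out.
def lhhLoop (classes : List (Int × Int)) (last : Int) : Int × Int × Int × Int → Nat → Int
  | _, 0 => 0
  | st, fuel + 1 =>
    match PySem.List.pyGet? classes st.2.2.2 with
    | none => 0   -- IndexError (outside Pre_)
    | some cls =>
      if st.2.2.2 = last then st.1
      else
        let upd : Int × Int × Int :=
          if cls.1 ≥ st.2.2.1 then (st.1 + 1, st.2.1, cls.2)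
          else if cls.2 ≤ st.2.1 then (st.1 + 1, cls.1, st.2.2.1)
          else (st.1, st.2.1, st.2.2.1)
        lhhLoop classes last (upd.1, upd.2.1, upd.2.2, st.2.2.2 + 1) fuel

def lecture_hall_helper_alt (classes : List (Int × Int)) (count : Int) (prevStart : Int) (prevEnd : Int) (num : Int) : Int :=
  lhhLoop classes ((classes.length : Int) - 1) (count, prevStart, prevEnd, num) (2 * classes.length + 1)

-- ===== PRECONDITION & SPEC =====
-- Pre_ excludes exactly the inputs on which A's subscript classes[num] raises IndexError.
def Pre_lecture_hall_helper (classes : List (Int × Int)) (count : Int) (prevStart : Int) (prevEnd : Int) (num : Int) : Prop :=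
  PySem.Raise.InRange classes.length num
instance (classes : List (Int × Int)) (count : Int) (prevStart : Int) (prevEnd : Int) (num : Int) : Decidable (Pre_lecture_hall_helper classes count prevStart prevEnd num) := by unfold Pre_lecture_hall_helper; infer_instance
def pvWitness_lecture_hall_helper : (List (Int × Int)) × Int × Int × Int × Int := ([(1, 2), (3, 4), (5, 6)], 0, 0, 0, 0)

def Spec_lecture_hall_helper (classes : List (Int × Int)) (count : Int) (prevStart : Int) (prevEnd : Int) (num : Int) (out : Int) : Prop := out = lecture_hall_helper_alt classes count prevStart prevEnd num
instance (classes : List (Int × Int)) (count : Int) (prevStart : Int) (prevEnd : Int) (num : Int) (out : Int) : Decidable (Spec_lecture_hall_helper classes count prevStart prevEnd num out) := by unfold Spec_lecture_hall_helper; infer_instance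

-- ===== CLAIM (what is proved, stated in full; the proofs are below) =====
def Claim_equal_lecture_hall_helper : Prop := ∀ (classes : List (Int × Int)) (count : Int) (prevStart : Int) (prevEnd : Int) (num : Int), Dom_lecture_hall_helper classes count prevStart prevEnd num → Pre_lecture_hall_helper classes count prevStart prevEnd num → Spec_lecture_hall_helper classes count prevStart prevEnd num (lecture_hall_helper classes count prevStart prevEnd num)

-- ===== LEMMAS AND PROOFS =====

theorem lhh_eq (classes : List (Int × Int)) :
    ∀ (fuel : Nat) (count prevStart prevEnd num : Int),
      lhhA classes count prevStart prevEnd num fuel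
        = lhhLoop classes ((classes.length : Int) - 1) (count, prevStart, prevEnd, num) fuel := by
  intro fuel
  induction fuel with
  | zero => intro count prevStart prevEnd num; rfl
  | succ fuel ih =>
    intro count prevStart prevEnd num
    rw [lhhA, lhhLoop]
    cases hget : PySem.List.pyGet? classes num with
    | none => rfl
    | some cls =>
      dsimp only
      by_cases hb0 : num = (classes.length : Int) - 1
      · rw [if_pos hb0, if_pos hb0]
      · rw [if_neg hb0, if_neg hb0]
        by_cases hb1 : cls.1 ≥ prevEnd
        · rw [if_pos hb1]
          rw [if_pos hb1]
          exact ih (count + 1) prevStart cls.2 (num + 1)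
        · rw [if_neg hb1]
          rw [if_neg hb1]
          by_cases hb2 : cls.2 ≤ prevStart
          · rw [if_pos hb2]
            rw [if_pos hb2]
            exact ih (count + 1) cls.1 prevEnd (num + 1)
          · rw [if_neg hb2]
            rw [if_neg hb2]
            exact ih count prevStart prevEnd (num + 1)

-- ===== VERDICT (by name: the statement is the Claim_ definition above) =====
theorem lecture_hall_helper_spec : Claim_equal_lecture_hall_helper := by
  intro classes count prevStart prevEnd num _ _
  exact lhh_eq classes (2 * classes.length + 1) count prevStart prevEnd num
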